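-- pv_equiv track=rewrite | github.com/mustitz/pdf-translator | horse.py | is_text_chunk
-- ===== SOURCE A (Python) =====
-- def good_ch(ch):
--     if ch.isalpha():
--         return True
--     if ch in ''' ,.;:"'!?-''':
--         return True
--     return False
--
-- def is_text_chunk(s, limit=3):
--     if len(s) < 2*limit:
--         alphas = sum(map(good_ch, s))
--         return alphas == len(s)
--
--     counter = 0
--     for ch in s:
--         if ch.isalpha():
--             counter += 1
--             if counter >= limit:
--                 return True
--         else:
--             counter = 0
--
--     return False
-- ===== SOURCE B (Python) =====
-- def good_ch(ch):
--     return ch.isalpha() or ch in ''' ,.;:"'!?-'''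
--
-- def is_text_chunk(s, limit=3):
--     if len(s) < 2 * limit:
--         return all(map(good_ch, s))
--     words = ''.join(c if c.isalpha() else ' ' for c in s).split()
--     return any(len(w) >= limit for w in words)
-- ===== Notes on version B (the rewrite author's own statement) =====
-- stated objective: idiomatic
-- what changed: The long branch drops the manual reset-counter scan: B masks non-letters to spaces, materializes the maximal letter runs with str.split(), and then checks run lengths with any(); the short branch becomes all(map(good_ch, s)) instead of a sum-vs-length comparison.
import Mathlib
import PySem

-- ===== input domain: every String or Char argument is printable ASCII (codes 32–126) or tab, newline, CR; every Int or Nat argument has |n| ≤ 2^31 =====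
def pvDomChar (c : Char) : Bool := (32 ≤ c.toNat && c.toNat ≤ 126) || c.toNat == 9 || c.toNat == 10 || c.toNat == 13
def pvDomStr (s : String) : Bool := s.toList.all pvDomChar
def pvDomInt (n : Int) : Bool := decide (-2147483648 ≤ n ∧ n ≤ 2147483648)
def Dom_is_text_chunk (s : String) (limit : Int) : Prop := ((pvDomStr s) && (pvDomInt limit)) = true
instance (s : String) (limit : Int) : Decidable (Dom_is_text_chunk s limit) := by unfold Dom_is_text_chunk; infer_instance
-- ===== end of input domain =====

-- B replaces A's reset-counter scan by mask-non-letters-to-spaces + split() + a run-length check (idiomatic decomposition, same cost).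

-- ===== PORT A =====
-- good_ch; Python's "ch in <string>" for the single character ch is exactly membership in the char list
def pvGoodCh (ch : Char) : Bool :=
  if PySem.Chars.isalpha ch then true
  else if (" ,.;:\"'!?-".toList).contains ch then true
  else false

-- A's for-loop over s with the reset counter, early return included
def pvALoop (limit : Int) : List Char → Int → Bool
  | [], _ => false
  | c :: rest, counter =>
    if PySem.Chars.isalpha c then
      if limit ≤ counter + 1 then true else pvALoop limit rest (counter + 1)
    else pvALoop limit rest 0

def is_text_chunk (s : String) (limit : Int) : Bool :=
  let cs := s.toList
  if (cs.length : Int) < 2 * limit then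
    decide ((cs.map (fun c => if pvGoodCh c then (1 : Int) else 0)).sum = (cs.length : Int))
  else
    pvALoop limit cs 0

-- ===== PORT B =====
def pvGoodChB (ch : Char) : Bool :=
  PySem.Chars.isalpha ch || (" ,.;:\"'!?-".toList).contains ch

-- ''.join(c if c.isalpha() else ' ' for c in s)
def pvMask (cs : List Char) : List Char :=
  cs.map (fun c => if PySem.Chars.isalpha c then c else ' ')

def is_text_chunk_alt (s : String) (limit : Int) : Bool :=
  let cs := s.toList
  if (cs.length : Int) < 2 * limit then
    cs.all pvGoodChB
  else
    (PySem.Chars.split₀ (pvMask cs)).any (fun w => decide (limit ≤ (w.length : Int)))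

-- ===== PRECONDITION & SPEC =====
def Spec_is_text_chunk (s : String) (limit : Int) (out : Bool) : Prop := out = is_text_chunk_alt s limit
instance (s : String) (limit : Int) (out : Bool) : Decidable (Spec_is_text_chunk s limit out) := by unfold Spec_is_text_chunk; infer_instance

-- ===== CLAIM (what is proved, stated in full; the proofs are below) =====
def Claim_equal_is_text_chunk : Prop := ∀ (s : String) (limit : Int), Dom_is_text_chunk s limit → Spec_is_text_chunk s limit (is_text_chunk s limit)

-- ===== LEMMAS AND PROOFS =====

-- A's good_ch and B's good_ch agree pointwise
theorem pvGood_eq (c : Char) : pvGoodCh c = pvGoodChB c := by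
  unfold pvGoodCh pvGoodChB
  by_cases h : PySem.Chars.isalpha c = true <;> simp [h]

-- A's sum-of-booleans == len(s) is B's all()
theorem pvSum_eq_all (cs : List Char) :
    decide ((cs.map (fun c => if pvGoodCh c = true then (1 : Int) else 0)).sum = (cs.length : Int))
      = cs.all pvGoodChB := by
  rw [PySem.List.sum_map_ite_one_zero]
  rcases h : cs.all pvGoodChB with _|_
  · simp only [decide_eq_false_iff_not]
    intro hc
    rw [Int.natCast_inj] at hc
    rw [List.countP_eq_length] at hc
    simp only [List.all_eq_false] at h
    obtain ⟨x, hx, hpx⟩ := h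
    exact hpx (by rw [← pvGood_eq]; exact hc x hx)
  · simp only [decide_eq_true_iff, Int.natCast_inj]
    rw [List.countP_eq_length]
    simp only [List.all_eq_true] at h
    intro a ha; rw [pvGood_eq]; exact h a ha

-- a letter is never whitespace (the ASCII letter ranges miss every isspace code point)
theorem alpha_not_space (c : Char) (h : PySem.Chars.isalpha c = true) :
    PySem.Chars.isspace c = false := by
  unfold PySem.Chars.isalpha PySem.Chars.isupper PySem.Chars.islower at h
  unfold PySem.Chars.isspace
  simp only [Bool.or_eq_true, Bool.and_eq_true, decide_eq_true_iff, Char.le_def] at h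
  simp only [Bool.or_eq_false_iff, Bool.and_eq_false_iff, decide_eq_false_iff_not]
  rcases h with ⟨h1,h2⟩|⟨h1,h2⟩ <;>
  · have h1' := UInt32.le_iff_toNat_le.mp h1
    have h2' := UInt32.le_iff_toNat_le.mp h2
    have hc : c.toNat = c.val.toNat := rfl
    have e1 : ('A').val.toNat = 65 := rfl
    have e2 : ('Z').val.toNat = 90 := rfl
    have e3 : ('a').val.toNat = 97 := rfl
    have e4 : ('z').val.toNat = 122 := rfl
    omega

-- members of the accumulator survive into split₀.go's output
theorem pvMemGo (cs : List Char) : ∀ (cur : List Char) (acc : List (List Char)) (w : List Char), w ∈ acc → w ∈ PySem.Chars.split₀.go cs cur acc := by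
  induction cs with
  | nil =>
    intro cur acc w hw
    unfold PySem.Chars.split₀.go
    split_ifs <;> simp [hw]
  | cons c rest ih =>
    intro cur acc w hw
    unfold PySem.Chars.split₀.go
    split_ifs with h1 h2
    · exact ih [] acc w hw
    · exact ih [] (cur.reverse :: acc) w (by simp [hw])
    · exact ih (c :: cur) acc w hw

-- a nonempty current run yields an output word at least that long
theorem pvGrows (cs : List Char) : ∀ (cur : List Char) (acc : List (List Char)), cur ≠ [] →
    ∃ w ∈ PySem.Chars.split₀.go cs cur acc, cur.length ≤ w.length := by
  induction cs with
  | nil =>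
    intro cur acc h
    unfold PySem.Chars.split₀.go
    rw [if_neg (by simpa using h)]
    exact ⟨cur.reverse, by simp⟩
  | cons c rest ih =>
    intro cur acc h
    unfold PySem.Chars.split₀.go
    split_ifs with h1 h2
    · exact absurd (List.isEmpty_iff.mp h2) h
    · exact ⟨cur.reverse, pvMemGo rest [] (cur.reverse :: acc) _ (by simp), by simp⟩
    · obtain ⟨w, hw, hl⟩ := ih (c :: cur) acc (by simp)
      exact ⟨w, hw, by simpa using Nat.le_of_succ_le hl⟩

-- the loop invariant: A's counter is the length of split₀.go's current run, no finished word reached the limit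
theorem pvInv (limit : Int) (cs : List Char) : ∀ (cur : List Char) (acc : List (List Char)),
    (∀ w ∈ acc, ¬ (limit ≤ (w.length : Int))) →
    (cur = [] ∨ ¬ (limit ≤ (cur.length : Int))) →
    pvALoop limit cs (cur.length : Int)
      = (PySem.Chars.split₀.go (pvMask cs) cur acc).any (fun w => decide (limit ≤ (w.length : Int))) := by
  induction cs with
  | nil =>
    intro cur acc hacc hcur
    simp only [pvMask, List.map_nil, pvALoop]
    unfold PySem.Chars.split₀.go
    split_ifs with h1
    · symm
      simp only [List.any_eq_false, List.mem_reverse, decide_eq_true_iff]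
      intro w hw
      exact hacc w hw
    · symm
      simp only [List.any_eq_false, List.mem_reverse, decide_eq_true_iff]
      intro w hw
      rcases List.mem_cons.mp hw with rfl | hw
      · rcases hcur with rfl | hc
        · simp at h1
        · simpa using hc
      · exact hacc w hw
  | cons c rest ih =>
    intro cur acc hacc hcur
    simp only [pvMask, List.map_cons, pvALoop]
    by_cases ha : PySem.Chars.isalpha c = true
    · rw [if_pos ha, if_pos ha]
      unfold PySem.Chars.split₀.go
      rw [if_neg (by simp [alpha_not_space c ha] : ¬ (PySem.Chars.isspace c = true))]
      by_cases hl : limit ≤ (cur.length : Int) + 1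
      · rw [if_pos hl]
        obtain ⟨w, hw, hlen⟩ := pvGrows (pvMask rest) (c :: cur) acc (by simp)
        symm
        rw [List.any_eq_true]
        refine ⟨w, by simpa [pvMask] using hw, ?_⟩
        simp only [decide_eq_true_iff]
        refine le_trans hl ?_
        exact_mod_cast by simpa using hlen
      · rw [if_neg hl]
        have := ih (c :: cur) acc hacc (Or.inr (by simpa using hl))
        simpa [pvMask] using this
    · rw [if_neg ha, if_neg ha]
      unfold PySem.Chars.split₀.go
      rw [if_pos (by decide : PySem.Chars.isspace ' ' = true)]
      by_cases he : cur.isEmpty = true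
      · rw [if_pos he]
        have := ih [] acc hacc (Or.inl rfl)
        simpa [pvMask] using this
      · rw [if_neg he]
        have hacc' : ∀ w ∈ cur.reverse :: acc, ¬ (limit ≤ (w.length : Int)) := by
          intro w hw
          rcases List.mem_cons.mp hw with rfl | hw
          · rcases hcur with rfl | hc
            · simp at he
            · simpa using hc
          · exact hacc w hw
        have := ih [] (cur.reverse :: acc) hacc' (Or.inl rfl)
        simpa [pvMask] using this

-- ===== VERDICT (by name: the statement is the Claim_ definition above) =====
theorem is_text_chunk_spec : Claim_equal_is_text_chunk := by
  intro s limit _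
  unfold Spec_is_text_chunk is_text_chunk is_text_chunk_alt
  simp only []
  by_cases h : (((s.length : Nat) : Int) < 2 * limit)
  · simpa [h] using pvSum_eq_all s.toList
  · simpa [h, PySem.Chars.split₀] using pvInv limit s.toList [] [] (by simp) (Or.inl rfl)
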